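-- pv_equiv track=rewrite | github.com/CT2020Hypernym/Hypernym | ruwordnet_parsing.py | tokenize_sense
-- ===== SOURCE A (Python) =====
-- from typing import Dict, List, Set, Tuple, Union
--
-- def tokenize_sense(src_tokenized: Union[tuple, list], main_word_pos: int) -> Tuple[tuple, Tuple[int, int]]:
--     """ Do additional tokenization of all term's words.
--
--     All terms of the RuWordNet are tokenized using spaces (e.g., "ПРЕДСТАВИТЕЛЬСТВО ЗА ГРАНИЦЕЙ"), but some terms can
--     contain punctuation, such as dash and comma (for example, "ФИЛОСОФ-ПРАГМАТИК" or "ПРЕСТУПЛЕНИЕ ПРОТИВ СВОБОДЫ, ЧЕСТИ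
--     И ДОСТОИНСТВА"). We skip all terms with the comma, because morphological parsing of such terms using simple
--     heuristics is difficult. But we process terms with the dash in the following way: we concert the dash as a separate
--     token. Also, we correct the position of the main word in the term accordingly with new re-tokenization. Besides,
--     if the main word contained the dash before re-tokenization, then after re-tokenization this word can consist of
--     several words. So, we use bounds of the main phrase instead of the single main word position.
--
--     :param src_tokenized: source tokenized term.
--     :param main_word_pos: a position of the main token in the term.
--     :return: re-tokenized term and bounds of the main phrase in the term.
--     """
--     new_tokens = []
--     main_word_start = main_word_pos
--     main_word_end = main_word_start + 1
--     for old_token_idx, token in enumerate(src_tokenized):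
--         dash_idx = token.find('-')
--         if dash_idx < 0:
--             subtokens = [token]
--         else:
--             subtokens = []
--             if dash_idx > 0:
--                 subtokens.append(token[0:dash_idx])
--             subtokens.append('-')
--             token_tail = token[(dash_idx + 1):]
--             dash_idx = token_tail.find('-')
--             while dash_idx >= 0:
--                 if dash_idx > 0:
--                     subtokens.append(token_tail[0:dash_idx])
--                 subtokens.append('-')
--                 token_tail = token_tail[(dash_idx + 1):]
--                 dash_idx = token_tail.find('-')
--             if len(token_tail) > 0:
--                 subtokens.append(token_tail)
--         new_tokens += subtokens
--         if old_token_idx == main_word_pos: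
--             main_word_end = main_word_start + len(subtokens)
--         elif old_token_idx < main_word_pos:
--             main_word_start += (len(subtokens) - 1)
--             main_word_end += (len(subtokens) - 1)
--     return tuple(new_tokens), (main_word_start, main_word_end)
-- ===== SOURCE B (Python) =====
-- def _split_dashes(token):
--     pieces = token.split('-')
--     if len(pieces) == 1:
--         return [token]
--     out = []
--     for i, p in enumerate(pieces):
--         if i > 0:
--             out.append('-')
--         if p:
--             out.append(p)
--     return out
--
--
-- def tokenize_sense(src_tokenized, main_word_pos):
--     sub_lists = [_split_dashes(token) for token in src_tokenized]
--     new_tokens = [sub for subs in sub_lists for sub in subs]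
--     main_word_start = main_word_pos + sum(
--         len(subs) - 1 for i, subs in enumerate(sub_lists) if i < main_word_pos)
--     if 0 <= main_word_pos < len(sub_lists):
--         main_word_end = main_word_start + len(sub_lists[main_word_pos])
--     else:
--         main_word_end = main_word_start + 1
--     return tuple(new_tokens), (main_word_start, main_word_end)
-- ===== Notes on version B (the rewrite author's own statement) =====
-- stated objective: simpler
-- what changed: B replaces A's hand-rolled find/slice dash-scanning loop with str.split('-') plus dash interleaving per token, and replaces A's interleaved per-iteration bound updates with a closed-form two-pass computation of the main-phrase bounds (offset sum over tokens before the main word, end from the main token's piece count).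
import Mathlib
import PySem

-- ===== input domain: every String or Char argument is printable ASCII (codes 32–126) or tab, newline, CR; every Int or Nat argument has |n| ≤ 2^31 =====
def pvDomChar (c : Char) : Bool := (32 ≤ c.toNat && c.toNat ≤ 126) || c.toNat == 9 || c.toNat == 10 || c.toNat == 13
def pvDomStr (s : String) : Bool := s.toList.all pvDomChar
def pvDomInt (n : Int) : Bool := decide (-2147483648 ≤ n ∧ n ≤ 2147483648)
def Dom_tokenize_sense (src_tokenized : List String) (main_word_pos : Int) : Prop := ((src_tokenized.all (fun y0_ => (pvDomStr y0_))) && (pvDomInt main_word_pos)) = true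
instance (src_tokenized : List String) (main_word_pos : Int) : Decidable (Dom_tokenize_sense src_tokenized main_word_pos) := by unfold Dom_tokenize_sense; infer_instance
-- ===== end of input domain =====

-- B re-splits each token with str.split('-') and interleaving, and computes the main-phrase
-- bounds by a closed-form two-pass formula instead of A's interleaved scan-and-update loop
-- (objective: simpler decomposition; return value only, no mutation involved).

-- ===== PORT A =====

-- A's inner `while dash_idx >= 0` loop needs these to terminate (cited by `decreasing_by`)
lemma pvFindNilDash : PySem.Chars.find [] ['-'] = -1 := by decide

lemma pvSliceFromLenLt (xs : List Char) (d : Int) (h0 : 0 ≤ d) (hne : xs ≠ []) :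
    (PySem.List.slice xs (some (d + 1)) none).length < xs.length := by
  rw [PySem.List.slice_from xs (by omega : (0:Int) ≤ d + 1)]
  simp only [List.length_drop]
  have := List.length_pos_iff.mpr hne
  omega

-- A's inner `while dash_idx >= 0` loop: `subtokens` is the accumulator built so far.
def tsWhileA (subtokens : List (List Char)) (token_tail : List Char) : List (List Char) :=
  if h : 0 ≤ PySem.Chars.find token_tail ['-'] then
    tsWhileA
      ((if 0 < PySem.Chars.find token_tail ['-'] then
          subtokens ++ [PySem.List.slice token_tail none (some (PySem.Chars.find token_tail ['-']))]
        else subtokens) ++ [['-']])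
      (PySem.List.slice token_tail (some (PySem.Chars.find token_tail ['-'] + 1)) none)
  else if 0 < token_tail.length then subtokens ++ [token_tail] else subtokens
termination_by token_tail.length
decreasing_by
  exact pvSliceFromLenLt token_tail _ h (by intro hnil; rw [hnil, pvFindNilDash] at h; omega)

-- the body of A's `for` loop computing `subtokens` for one token
def splitTokenA (token : List Char) : List (List Char) :=
  if PySem.Chars.find token ['-'] < 0 then [token]
  else
    tsWhileA
      ((if 0 < PySem.Chars.find token ['-'] then
          [PySem.List.slice token none (some (PySem.Chars.find token ['-']))]
        else []) ++ [['-']])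
      (PySem.List.slice token (some (PySem.Chars.find token ['-'] + 1)) none)

-- the rest of A's `for` loop body: extend `new_tokens` and update the two bounds
def bodyA (pos : Int) (st : List (List Char) × Int × Int) (oi : Int × String) :
    List (List Char) × Int × Int :=
  if oi.1 = pos then (st.1 ++ splitTokenA oi.2.toList, st.2.1, st.2.1 + ((splitTokenA oi.2.toList).length : Int))
  else if oi.1 < pos then
    (st.1 ++ splitTokenA oi.2.toList, st.2.1 + (((splitTokenA oi.2.toList).length : Int) - 1),
      st.2.2 + (((splitTokenA oi.2.toList).length : Int) - 1))
  else (st.1 ++ splitTokenA oi.2.toList, st.2.1, st.2.2)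

def tokenize_sense (src_tokenized : List String) (main_word_pos : Int) : List String × (Int × Int) :=
  let r := (PySem.List.enumerate src_tokenized 0).foldl (bodyA main_word_pos)
    ([], main_word_pos, main_word_pos + 1)
  (r.1.map (fun cs => String.ofList cs), r.2)

-- ===== PORT B =====

-- B's `_split_dashes`: split on '-', then interleave dashes, dropping empty pieces.
def splitDashesB (token : List Char) : List (List Char) :=
  if (PySem.Chars.splitOn token ['-']).length = 1 then [token]
  else
    (PySem.List.enumerate (PySem.Chars.splitOn token ['-']) 0).foldl
      (fun out ip =>
        (if 0 < ip.1 then out ++ [['-']] else out) ++ (if 0 < ip.2.length then [ip.2] else []))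
      []

def tokenize_sense_alt (src_tokenized : List String) (main_word_pos : Int) : List String × (Int × Int) :=
  let sub_lists := src_tokenized.map (fun t => splitDashesB t.toList)
  let main_word_start := main_word_pos +
    (PySem.List.enumerate sub_lists 0).foldl
      (fun acc ip => if ip.1 < main_word_pos then acc + ((ip.2.length : Int) - 1) else acc) 0
  let main_word_end :=
    if 0 ≤ main_word_pos ∧ main_word_pos < (sub_lists.length : Int) then
      main_word_start + ((PySem.List.pyGetD sub_lists main_word_pos []).length : Int)
    else main_word_start + 1
  (sub_lists.flatten.map (fun cs => String.ofList cs), (main_word_start, main_word_end))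

-- ===== PRECONDITION & SPEC =====
def Spec_tokenize_sense (src_tokenized : List String) (main_word_pos : Int) (out : List String × (Int × Int)) : Prop := out = tokenize_sense_alt src_tokenized main_word_pos
instance (src_tokenized : List String) (main_word_pos : Int) (out : List String × (Int × Int)) : Decidable (Spec_tokenize_sense src_tokenized main_word_pos out) := by unfold Spec_tokenize_sense; infer_instance

-- ===== CLAIM (what is proved, stated in full; the proofs are below) =====
def Claim_equal_tokenize_sense : Prop := ∀ (src_tokenized : List String) (main_word_pos : Int), Dom_tokenize_sense src_tokenized main_word_pos → Spec_tokenize_sense src_tokenized main_word_pos (tokenize_sense src_tokenized main_word_pos)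

-- ===== LEMMAS AND PROOFS =====

-- canonical '-'-splitting (the pieces `token.split('-')` produces)
def canonP : List Char → List (List Char)
  | [] => [[]]
  | c :: s =>
    if c = '-' then [] :: canonP s
    else (c :: (canonP s).headI) :: (canonP s).tail

def gOpt (p : List Char) : List (List Char) := if 0 < p.length then [p] else []

def gTail (ps : List (List Char)) : List (List Char) := ps.flatMap (fun p => ['-'] :: gOpt p)

def gFull : List (List Char) → List (List Char)
  | [] => []
  | p :: ps => gOpt p ++ gTail ps

lemma canonP_ne_nil (s : List Char) : canonP s ≠ [] := by
  cases s with
  | nil => simp [canonP]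
  | cons c t =>
    simp only [canonP]
    split <;> simp

lemma canonP_cons_exists (s : List Char) : ∃ q qs, canonP s = q :: qs := by
  cases hcq : canonP s with
  | nil => exact absurd hcq (canonP_ne_nil s)
  | cons q qs => exact ⟨q, qs, rfl⟩

lemma findgo_shift (s : List Char) : ∀ k : Nat,
    PySem.Chars.find.go ['-'] s k =
      if PySem.Chars.find.go ['-'] s 0 = -1 then -1 else (k : Int) + PySem.Chars.find.go ['-'] s 0 := by
  induction s with
  | nil => intro k; simp [PySem.Chars.find.go]
  | cons c t ih =>
    intro k
    by_cases hc : List.isPrefixOf ['-'] (c :: t)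
    · simp [PySem.Chars.find.go, hc]
    · rw [show ∀ m : Nat, PySem.Chars.find.go ['-'] (c :: t) m = PySem.Chars.find.go ['-'] t (m + 1) from
        fun m => by simp [PySem.Chars.find.go, hc],
        show PySem.Chars.find.go ['-'] (c :: t) 0 = PySem.Chars.find.go ['-'] t 1 from by
          simp [PySem.Chars.find.go, hc]]
      rw [ih (k + 1), ih 1]
      have hX : -1 ≤ PySem.Chars.find.go ['-'] t 0 := by
        have := PySem.Chars.neg_one_le_find t ['-']
        simpa [PySem.Chars.find] using this
      by_cases hA : PySem.Chars.find.go ['-'] t 0 = -1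
      · simp [hA]
      · simp only [hA, if_false]
        rw [if_neg (by omega)]
        push_cast
        ring

lemma find_cons (c : Char) (s : List Char) :
    PySem.Chars.find (c :: s) ['-'] =
      if c = '-' then 0
      else if PySem.Chars.find s ['-'] = -1 then -1 else PySem.Chars.find s ['-'] + 1 := by
  by_cases hc : c = '-'
  · have hpre : List.isPrefixOf ['-'] (c :: s) = true := by simp [List.isPrefixOf, hc]
    simp [PySem.Chars.find, PySem.Chars.find.go, hc]
  · have hpre : List.isPrefixOf ['-'] (c :: s) = false := by
      simp [List.isPrefixOf]
      exact fun h => hc h.symm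
    simp only [PySem.Chars.find]
    rw [show PySem.Chars.find.go ['-'] (c :: s) 0 = PySem.Chars.find.go ['-'] s 1 from by
      simp [PySem.Chars.find.go, hpre]]
    rw [findgo_shift s 1]
    rw [if_neg hc]
    by_cases hA : PySem.Chars.find.go ['-'] s 0 = -1
    · simp [hA]
    · simp only [hA, if_false]
      omega

lemma canon_no_dash (s : List Char) (h : PySem.Chars.find s ['-'] = -1) : canonP s = [s] := by
  induction s with
  | nil => simp [canonP]
  | cons c t ih =>
    rw [find_cons] at h
    by_cases hc : c = '-'
    · rw [if_pos hc] at h; omega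
    · rw [if_neg hc] at h
      have hb := PySem.Chars.neg_one_le_find t ['-']
      by_cases hne : PySem.Chars.find t ['-'] = -1
      · simp [canonP, hc, ih hne]
      · rw [if_neg hne] at h; omega

lemma canon_split (s : List Char) (h : 0 ≤ PySem.Chars.find s ['-']) :
    canonP s = s.take (PySem.Chars.find s ['-']).toNat ::
      canonP (s.drop ((PySem.Chars.find s ['-']).toNat + 1)) := by
  induction s with
  | nil => rw [pvFindNilDash] at h; omega
  | cons c t ih =>
    by_cases hc : c = '-'
    · rw [find_cons]
      simp [hc, canonP]
    · rw [find_cons, if_neg hc] at h ⊢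
      have hb := PySem.Chars.neg_one_le_find t ['-']
      by_cases hne : PySem.Chars.find t ['-'] = -1
      · rw [if_pos hne] at h; omega
      · rw [if_neg hne] at h ⊢
        have ht : 0 ≤ PySem.Chars.find t ['-'] := by omega
        have htn : (PySem.Chars.find t ['-'] + 1).toNat = (PySem.Chars.find t ['-']).toNat + 1 := by omega
        rw [htn, List.take_succ_cons, List.drop_succ_cons]
        simp only [canonP, if_neg hc]
        rw [ih ht]
        simp

lemma splitOnGo_spec (l : List Char) : ∀ (fuel : Nat) (cur : List Char) (acc : List (List Char)),
    l.length < fuel →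
    PySem.Chars.splitOn.go ['-'] fuel l cur acc =
      acc.reverse ++ (cur.reverse ++ (canonP l).headI) :: (canonP l).tail := by
  induction l with
  | nil =>
    intro fuel cur acc hf
    cases fuel with
    | zero => omega
    | succ f => simp [PySem.Chars.splitOn.go, canonP]
  | cons c t ih =>
    intro fuel cur acc hf
    cases fuel with
    | zero => omega
    | succ f =>
      obtain ⟨q, qs, hq⟩ := canonP_cons_exists t
      by_cases hcd : c = '-'
      · have hpre : List.isPrefixOf ['-'] (c :: t) = true := by simp [List.isPrefixOf, hcd]
        rw [show PySem.Chars.splitOn.go ['-'] (f + 1) (c :: t) cur acc =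
              PySem.Chars.splitOn.go ['-'] f t [] (cur.reverse :: acc) from by
          simp [PySem.Chars.splitOn.go, hpre]]
        rw [ih f [] (cur.reverse :: acc) (by simp at hf ⊢; omega)]
        simp [canonP, hcd, hq]
      · have hpre : List.isPrefixOf ['-'] (c :: t) = false := by
          simp [List.isPrefixOf]
          exact fun h => hcd h.symm
        rw [show PySem.Chars.splitOn.go ['-'] (f + 1) (c :: t) cur acc =
              PySem.Chars.splitOn.go ['-'] f t (c :: cur) acc from by
          simp [PySem.Chars.splitOn.go, hpre]]
        rw [ih f (c :: cur) acc (by simp at hf ⊢; omega)]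
        simp [canonP, hcd, hq]

lemma splitOn_eq_canon (s : List Char) : PySem.Chars.splitOn s ['-'] = canonP s := by
  rw [PySem.Chars.splitOn, splitOnGo_spec s (s.length + 1) [] [] (by omega)]
  obtain ⟨p, ps, hp⟩ := canonP_cons_exists s
  simp [hp]

lemma tsWhileA_eq (n : Nat) : ∀ (s : List Char) (acc : List (List Char)), s.length = n →
    tsWhileA acc s = acc ++ gFull (canonP s) := by
  induction n using Nat.strong_induction_on with
  | _ n ih =>
    intro s acc hn
    rw [tsWhileA]
    by_cases h : 0 ≤ PySem.Chars.find s ['-']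
    · rw [dif_pos h]
      have hle := PySem.Chars.find_le_length s ['-']
      have hne : s ≠ [] := by
        intro hnil; rw [hnil, pvFindNilDash] at h; omega
      have hlen : 0 < s.length := List.length_pos_iff.mpr hne
      set d := PySem.Chars.find s ['-'] with hd
      rw [PySem.List.slice_from s (by omega : (0:Int) ≤ d + 1),
          PySem.List.slice_to s h]
      have hdn : (d + 1).toNat = d.toNat + 1 := by omega
      rw [hdn]
      rw [ih (s.length - (d.toNat + 1)) (by omega) _ _ (by simp)]
      rw [show canonP s = s.take d.toNat :: canonP (s.drop (d.toNat + 1)) from by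
        rw [hd]; exact canon_split s h]
      obtain ⟨q, qs, hq⟩ := canonP_cons_exists (s.drop (d.toNat + 1))
      rw [hq]
      have htake : (s.take d.toNat).length = d.toNat := by
        rw [List.length_take]; omega
      simp only [gFull, gTail, gOpt, htake]
      by_cases hdp : 0 < d
      · rw [if_pos hdp, if_pos (by omega : 0 < d.toNat)]
        simp
      · rw [if_neg hdp, if_neg (by omega : ¬ 0 < d.toNat)]
        simp
    · rw [dif_neg h]
      have hm1 : PySem.Chars.find s ['-'] = -1 := by
        have := PySem.Chars.neg_one_le_find s ['-']
        omega
      rw [canon_no_dash s hm1]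
      by_cases hs : 0 < s.length
      · rw [if_pos hs]
        simp [gFull, gTail, gOpt, hs]
      · rw [if_neg hs]
        simp [gFull, gTail, gOpt, hs]

lemma foldB_tail (ps : List (List Char)) : ∀ (acc : List (List Char)) (k : Int), 0 < k →
    (PySem.List.enumerate ps k).foldl
      (fun out ip =>
        (if 0 < ip.1 then out ++ [['-']] else out) ++ (if 0 < ip.2.length then [ip.2] else []))
      acc = acc ++ gTail ps := by
  induction ps with
  | nil => intro acc k hk; simp [PySem.List.enumerate, gTail]
  | cons p rest ih =>
    intro acc k hk
    rw [PySem.List.enumerate_cons]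
    simp only [List.foldl_cons, if_pos hk]
    rw [ih _ (k + 1) (by omega)]
    by_cases hp : 0 < p.length
    · simp [gTail, gOpt, hp]
    · simp [gTail, gOpt, hp]

lemma splitTokenA_eq (t : List Char) : splitTokenA t = splitDashesB t := by
  unfold splitTokenA splitDashesB
  rw [splitOn_eq_canon]
  by_cases h : PySem.Chars.find t ['-'] < 0
  · have hm1 : PySem.Chars.find t ['-'] = -1 := by
      have := PySem.Chars.neg_one_le_find t ['-']
      omega
    rw [canon_no_dash t hm1]
    simp [h]
  · have h : 0 ≤ PySem.Chars.find t ['-'] := by omega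
    rw [if_neg (by omega : ¬ PySem.Chars.find t ['-'] < 0)]
    have hle := PySem.Chars.find_le_length t ['-']
    have hne : t ≠ [] := by
      intro hnil; rw [hnil, pvFindNilDash] at h; omega
    have hlen : 0 < t.length := List.length_pos_iff.mpr hne
    set d := PySem.Chars.find t ['-'] with hd
    rw [PySem.List.slice_from t (by omega : (0:Int) ≤ d + 1), PySem.List.slice_to t h]
    have hdn : (d + 1).toNat = d.toNat + 1 := by omega
    rw [hdn]
    rw [tsWhileA_eq _ _ _ rfl]
    rw [show canonP t = t.take d.toNat :: canonP (t.drop (d.toNat + 1)) from by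
      rw [hd]; exact canon_split t h]
    obtain ⟨q, qs, hq⟩ := canonP_cons_exists (t.drop (d.toNat + 1))
    rw [hq]
    rw [if_neg (by simp : ¬ (t.take d.toNat :: q :: qs).length = 1)]
    rw [PySem.List.enumerate_cons]
    simp only [List.foldl_cons, zero_add]
    rw [foldB_tail _ _ 1 (by omega)]
    have htake : (t.take d.toNat).length = d.toNat := by
      rw [List.length_take]; omega
    simp only [gFull, gTail, gOpt, htake]
    by_cases hdp : 0 < d
    · rw [if_pos hdp, if_pos (by omega : 0 < d.toNat)]
      simp
    · rw [if_neg hdp, if_neg (by omega : ¬ 0 < d.toNat)]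
      simp

-- the loop body of A over the per-token subtoken lists (splitTokenA already applied)
def bodyA' (pos : Int) (st : List (List Char) × Int × Int) (oi : Int × List (List Char)) :
    List (List Char) × Int × Int :=
  if oi.1 = pos then (st.1 ++ oi.2, st.2.1, st.2.1 + (oi.2.length : Int))
  else if oi.1 < pos then
    (st.1 ++ oi.2, st.2.1 + ((oi.2.length : Int) - 1), st.2.2 + ((oi.2.length : Int) - 1))
  else (st.1 ++ oi.2, st.2.1, st.2.2)

-- the index-weighted count B's sum computes
def cntC : List (List (List Char)) → Int → Int → Int
  | [], _, _ => 0
  | subs :: rest, k, pos => (if k < pos then (subs.length : Int) - 1 else 0) + cntC rest (k + 1) pos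

lemma foldB_sum (l : List (List (List Char))) (pos : Int) : ∀ (k a : Int),
    (PySem.List.enumerate l k).foldl
      (fun acc ip => if ip.1 < pos then acc + ((ip.2.length : Int) - 1) else acc) a
      = a + cntC l k pos := by
  induction l with
  | nil => intro k a; simp [PySem.List.enumerate, cntC]
  | cons subs rest ih =>
    intro k a
    rw [PySem.List.enumerate_cons]
    simp only [List.foldl_cons]
    rw [ih (k + 1)]
    rw [show cntC (subs :: rest) k pos =
      (if k < pos then (subs.length : Int) - 1 else 0) + cntC rest (k + 1) pos from rfl]
    split <;> ring

lemma enumerate_map {α β : Type} (f : α → β) (l : List α) : ∀ (k : Int),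
    PySem.List.enumerate (l.map f) k = (PySem.List.enumerate l k).map (fun p => (p.1, f p.2)) := by
  induction l with
  | nil => intro k; simp [PySem.List.enumerate]
  | cons x t ih => intro k; rw [List.map_cons, PySem.List.enumerate_cons, PySem.List.enumerate_cons, ih]; simp

lemma foldA_spec (pos : Int) (l : List (List (List Char))) :
    ∀ (k : Int) (toks : List (List Char)) (s e : Int),
    (PySem.List.enumerate l k).foldl (bodyA' pos) (toks, s, e)
    = (toks ++ l.flatten,
       s + cntC l k pos,
       if k ≤ pos ∧ pos < k + (l.length : Int) then
         s + cntC l k pos + ((l.getD (pos - k).toNat []).length : Int)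
       else e + cntC l k pos) := by
  induction l with
  | nil =>
    intro k toks s e
    simp [PySem.List.enumerate, cntC]
  | cons subs rest ih =>
    intro k toks s e
    rw [PySem.List.enumerate_cons]
    simp only [List.foldl_cons]
    have hcnt : cntC (subs :: rest) k pos =
      (if k < pos then (subs.length : Int) - 1 else 0) + cntC rest (k + 1) pos := rfl
    rcases lt_trichotomy k pos with hk | hk | hk
    · rw [show bodyA' pos (toks, s, e) (k, subs) =
        (toks ++ subs, s + ((subs.length : Int) - 1), e + ((subs.length : Int) - 1)) from by
          simp only [bodyA']
          rw [if_neg (by omega : ¬ k = pos), if_pos hk]]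
      rw [ih (k + 1)]
      rw [hcnt, if_pos hk]
      simp only [Prod.mk.injEq]
      refine ⟨by simp, by ring, ?_⟩
      by_cases hr : k + 1 ≤ pos ∧ pos < k + 1 + (rest.length : Int)
      · rw [if_pos hr, if_pos (by simp; omega)]
        rw [show (pos - k).toNat = (pos - (k + 1)).toNat + 1 from by omega]
        simp only [List.getD_cons_succ]
        ring
      · rw [if_neg hr, if_neg (by simp at hr ⊢; intro h; omega)]
        ring
    · rw [show bodyA' pos (toks, s, e) (k, subs) =
        (toks ++ subs, s, s + (subs.length : Int)) from by
          simp only [bodyA']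
          rw [if_pos hk]]
      rw [ih (k + 1)]
      rw [hcnt, if_neg (by omega : ¬ k < pos)]
      simp only [Prod.mk.injEq]
      refine ⟨by simp, by ring, ?_⟩
      rw [if_neg (by intro hh; omega), if_pos (by simp; omega)]
      rw [show (pos - k).toNat = 0 from by omega]
      simp only [List.getD_cons_zero]
      ring
    · rw [show bodyA' pos (toks, s, e) (k, subs) = (toks ++ subs, s, e) from by
        simp only [bodyA']
        rw [if_neg (by omega : ¬ k = pos), if_neg (by omega : ¬ k < pos)]]
      rw [ih (k + 1)]
      rw [hcnt, if_neg (by omega : ¬ k < pos)]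
      simp only [Prod.mk.injEq]
      refine ⟨by simp, by ring, ?_⟩
      rw [if_neg (by intro hh; omega), if_neg (by intro hh; omega)]
      ring

-- ===== VERDICT (by name: the statement is the Claim_ definition above) =====
theorem tokenize_sense_spec : Claim_equal_tokenize_sense := by
  intro src pos _
  unfold Spec_tokenize_sense
  simp only [tokenize_sense, tokenize_sense_alt]
  have hbody : (bodyA pos) = fun st (oi : Int × String) => bodyA' pos st (oi.1, splitDashesB oi.2.toList) := by
    funext st oi
    simp only [bodyA, bodyA', splitTokenA_eq]
  rw [hbody]
  rw [show (PySem.List.enumerate src 0).foldl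
        (fun st (oi : Int × String) => bodyA' pos st (oi.1, splitDashesB oi.2.toList))
        ([], pos, pos + 1)
      = (PySem.List.enumerate (src.map (fun t => splitDashesB t.toList)) 0).foldl (bodyA' pos)
        ([], pos, pos + 1) from by
    rw [enumerate_map, List.foldl_map]]
  rw [foldA_spec pos (src.map (fun t => splitDashesB t.toList)) 0 [] pos (pos + 1)]
  rw [foldB_sum (src.map (fun t => splitDashesB t.toList)) pos 0 0]
  set l := src.map (fun t => splitDashesB t.toList) with hl
  simp only [Prod.mk.injEq]
  refine ⟨by simp, by ring, ?_⟩
  by_cases hc : 0 ≤ pos ∧ pos < (l.length : Int)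
  · rw [if_pos (by exact ⟨hc.1, by have := hc.2; omega⟩), if_pos hc]
    rw [PySem.List.pyGetD_eq_getElem l ([] : List (List Char)) hc.1 hc.2]
    rw [show (pos - 0).toNat = pos.toNat from by omega]
    rw [List.getD_eq_getElem l [] (by omega : pos.toNat < l.length)]
    ring
  · rw [if_neg (by intro h; exact hc ⟨h.1, by have := h.2; omega⟩), if_neg hc]
    ring
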